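-- pv_equiv track=rewrite | github.com/jpmorganchase/nbcelltests | nbcelltests/shared.py | cell_injected_into_test
-- ===== SOURCE A (Python) =====
-- CELL_INJ_TOKEN = r"%cell"
--
-- CELL_SKIP_TOKEN = r"# no %cell"
--
-- def source2lines(source):
--     return source.splitlines(True)
--
-- def get_cell_inj_span(test_line):
--     """
--     Return the location of %cell in the given line as (start_index,
--     end_index), or None if %cell does not occur.
--     """
--     if not test_line.strip().startswith(CELL_INJ_TOKEN):
--         return None
--     else:
--         cell_start = test_line.index(CELL_INJ_TOKEN)
--         cell_end = cell_start + len(CELL_INJ_TOKEN)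
--         return cell_start, cell_end
--
-- def cell_injected_into_test(test_source):
--     """
--     Return True if the corresponding cell is injected into the test,
--     False if the cell is deliberately not injected, or None if there
--     is no deliberate command either way.
--     """
--     inject = False
--     run = None
--     for test_line in source2lines(test_source):
--         if inject is False and get_cell_inj_span(test_line) is not None:
--             inject = True
--         elif run is None and test_line.strip().startswith(CELL_SKIP_TOKEN):
--             run = False
--
--     if run is False and inject:
--         raise ValueError("'%s' and '%s' are mutually exclusive but both were supplied:\n%s" % (CELL_SKIP_TOKEN, CELL_INJ_TOKEN, test_source))
--
--     return inject or run
-- ===== SOURCE B (Python) =====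
-- CELL_INJ_TOKEN = r"%cell"
--
-- CELL_SKIP_TOKEN = r"# no %cell"
--
--
-- def cell_injected_into_test(test_source):
--     # Single character-level scan: no line splitting at all.  `head` means we are
--     # still in the leading whitespace of the current line; at the first non-blank
--     # character of a line we match the directive tokens in place with
--     # str.startswith(token, i) (neither token contains a line break, so a match
--     # never crosses a line boundary).
--     inject = False
--     skip = False
--     head = True
--     for i, ch in enumerate(test_source):
--         if ch == "\n" or ch == "\r":
--             head = True
--         elif head:
--             if ch == " " or ch == "\t":
--                 pass
--             elif test_source.startswith(CELL_INJ_TOKEN, i):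
--                 inject = True
--                 head = False
--             elif test_source.startswith(CELL_SKIP_TOKEN, i):
--                 skip = True
--                 head = False
--             else:
--                 head = False
--     if skip and inject:
--         raise ValueError("'%s' and '%s' are mutually exclusive but both were supplied:\n%s" % (CELL_SKIP_TOKEN, CELL_INJ_TOKEN, test_source))
--     if inject:
--         return True
--     if skip:
--         return False
--     return None
-- ===== Notes on version B (the rewrite author's own statement) =====
-- stated objective: alternative
-- what changed: Replaces A's line-splitting loop (splitlines + per-line strip/startswith state machine over (inject, run)) with a single character-level automaton over the raw string that tracks only whether it is inside a line's leading whitespace and matches both directive tokens in place with startswith(token, i); no line list is ever built.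
import Mathlib
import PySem

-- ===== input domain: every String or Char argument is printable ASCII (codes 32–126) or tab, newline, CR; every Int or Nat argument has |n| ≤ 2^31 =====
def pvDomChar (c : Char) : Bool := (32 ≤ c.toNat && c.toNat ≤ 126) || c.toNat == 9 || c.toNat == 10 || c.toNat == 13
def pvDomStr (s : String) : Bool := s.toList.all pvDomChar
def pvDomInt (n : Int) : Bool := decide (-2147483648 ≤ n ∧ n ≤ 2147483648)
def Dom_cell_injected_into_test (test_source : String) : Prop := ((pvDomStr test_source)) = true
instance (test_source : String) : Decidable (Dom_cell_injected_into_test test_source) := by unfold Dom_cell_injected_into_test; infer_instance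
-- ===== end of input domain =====

-- B replaces A's line-splitting state machine with a single character-level automaton over the raw
-- string (alternative decomposition; same cost; on the inputs where Python A raises ValueError the
-- Python B raises the same ValueError — those inputs are excluded by Pre_).


-- Hand port of str.splitlines(keepends=True), exact on Dom (the only line breaks a Dom string can
-- contain are '\n', '\r' and '\r\n'; Python's extra Unicode/control breaks cannot occur there).
def splitlinesKeep : List Char → List Char → List (List Char)
  | [], acc => if acc = [] then [] else [acc.reverse]
  | '\n' :: rest, acc => (acc.reverse ++ ['\n']) :: splitlinesKeep rest []
  | '\r' :: '\n' :: rest, acc => (acc.reverse ++ ['\r', '\n']) :: splitlinesKeep rest []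
  | '\r' :: rest, acc => (acc.reverse ++ ['\r']) :: splitlinesKeep rest []
  | c :: rest, acc => splitlinesKeep rest (c :: acc)

-- "line.strip().startswith(token)" for the two tokens, named for Pre_ and the proofs.
def pvInjLine (l : List Char) : Bool := PySem.Chars.startswith (PySem.Chars.strip l) "%cell".toList
def pvSkipLine (l : List Char) : Bool := PySem.Chars.startswith (PySem.Chars.strip l) "# no %cell".toList

-- ===== PORT A =====
-- source2lines(source) = source.splitlines(True)
def source2lines (source : String) : List (List Char) := splitlinesKeep source.toList []

-- get_cell_inj_span: Python's .index can only be reached when '%cell' occurs in the line (the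
-- stripped line starts with it), and there PySem.Chars.find equals .index.
def get_cell_inj_span (test_line : List Char) : Option (Int × Int) :=
  if !(PySem.Chars.startswith (PySem.Chars.strip test_line) "%cell".toList) then none
  else
    let cell_start := PySem.Chars.find test_line "%cell".toList
    let cell_end := cell_start + ("%cell".toList.length : Int)
    some (cell_start, cell_end)

-- the body of A's for-loop, on the state (inject, run)
def stepA (st : Bool × Option Bool) (test_line : List Char) : Bool × Option Bool :=
  if st.1 == false && (get_cell_inj_span test_line).isSome then (true, st.2)
  else if st.2 == none && PySem.Chars.startswith (PySem.Chars.strip test_line) "# no %cell".toList then (st.1, some false)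
  else st

def cell_injected_into_test (test_source : String) : Option Bool :=
  let st := (source2lines test_source).foldl stepA (false, none)
  -- Python raises ValueError on the next branch; those inputs are excluded by Pre_.
  if st.2 == some false && st.1 then none
  else if st.1 then some true else st.2

-- ===== PORT B =====
-- Source B walks the raw string character by character with a flag `head` ("inside the leading
-- whitespace of the current line") and matches the tokens in place with
-- test_source.startswith(token, i); the port carries the suffix starting at i, on which
-- startswith(token, i) is PySem.Chars.startswith of the suffix.
def scanB : List Char → Bool → Bool → Bool → Bool × Bool
  | [], inject, skip, _ => (inject, skip)
  | c :: rest, inject, skip, head =>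
    if c = '\n' ∨ c = '\r' then scanB rest inject skip true
    else if head then
      if c = ' ' ∨ c = '\t' then scanB rest inject skip true
      else if PySem.Chars.startswith (c :: rest) "%cell".toList then scanB rest true skip false
      else if PySem.Chars.startswith (c :: rest) "# no %cell".toList then scanB rest inject true false
      else scanB rest inject skip false
    else scanB rest inject skip false

def cell_injected_into_test_alt (test_source : String) : Option Bool :=
  let r := scanB test_source.toList false false true
  -- Python raises ValueError on the next branch; those inputs are excluded by Pre_.
  if r.2 && r.1 then none
  else if r.1 then some true
  else if r.2 then some false
  else none

-- ===== PRECONDITION & SPEC =====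
-- Pre_ excludes exactly the sources holding both an inject-directive line and a skip-directive
-- line, on which Python A raises ValueError (and Python B raises the same ValueError).
def Pre_cell_injected_into_test (test_source : String) : Prop :=
  ¬ ((splitlinesKeep test_source.toList []).any pvInjLine = true ∧
     (splitlinesKeep test_source.toList []).any pvSkipLine = true)
instance (test_source : String) : Decidable (Pre_cell_injected_into_test test_source) := by
  unfold Pre_cell_injected_into_test; infer_instance

def pvWitness_cell_injected_into_test : String := "%cell # run\nx = 1\n"

def Spec_cell_injected_into_test (test_source : String) (out : Option Bool) : Prop := out = cell_injected_into_test_alt test_source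
instance (test_source : String) (out : Option Bool) : Decidable (Spec_cell_injected_into_test test_source out) := by unfold Spec_cell_injected_into_test; infer_instance

-- ===== CLAIM (what is proved, stated in full; the proofs are below) =====
def Claim_equal_cell_injected_into_test : Prop := ∀ (test_source : String), Dom_cell_injected_into_test test_source → Pre_cell_injected_into_test test_source → Spec_cell_injected_into_test test_source (cell_injected_into_test test_source)

-- ===== LEMMAS AND PROOFS =====

lemma tokInj_eq : "%cell".toList = ['%', 'c', 'e', 'l', 'l'] := rfl
lemma tokSkip_eq : "# no %cell".toList = ['#', ' ', 'n', 'o', ' ', '%', 'c', 'e', 'l', 'l'] := rfl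

lemma inj_span_isSome (l : List Char) : (get_cell_inj_span l).isSome = pvInjLine l := by
  unfold get_cell_inj_span pvInjLine
  cases h : PySem.Chars.startswith (PySem.Chars.strip l) "%cell".toList <;> simp only [h] <;> simp

-- A stripped line cannot start with both '%cell' and '# no %cell'.
lemma inj_skip_exclusive (l : List Char) : pvInjLine l = true → pvSkipLine l = false := by
  intro h
  unfold pvInjLine at h
  unfold pvSkipLine
  rw [PySem.Chars.startswith_iff] at h
  by_contra hs
  rw [Bool.not_eq_false, PySem.Chars.startswith_iff] at hs
  obtain ⟨t1, ht1⟩ := h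
  obtain ⟨t2, ht2⟩ := hs
  rw [← ht1] at ht2
  simp at ht2

-- One loop step of A in closed form.
lemma stepA_closed (i : Bool) (r : Option Bool) (l : List Char) :
    stepA (i, r) l = (i || pvInjLine l, if r = none ∧ pvSkipLine l = true then some false else r) := by
  unfold stepA
  rw [show (get_cell_inj_span l).isSome = pvInjLine l from inj_span_isSome l,
      show PySem.Chars.startswith (PySem.Chars.strip l) "# no %cell".toList = pvSkipLine l from rfl]
  cases hinj : pvInjLine l
  · cases i <;> cases r <;> cases hS : pvSkipLine l <;> simp [hinj, hS]
  · have hskip := inj_skip_exclusive l hinj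
    cases i <;> cases r <;> simp [hinj, hskip]

-- A's whole state machine computed in closed form: the two per-line scans.
lemma loopA (ls : List (List Char)) (i : Bool) (r : Option Bool) :
    ls.foldl stepA (i, r)
    = (i || ls.any pvInjLine,
       if r = none then (if ls.any pvSkipLine then some false else none) else r) := by
  induction ls generalizing i r with
  | nil => simp
  | cons l ls ih =>
    rw [List.foldl_cons, stepA_closed, ih]
    refine Prod.ext ?_ ?_
    · simp [List.any_cons, Bool.or_assoc]
    · cases r <;> cases hS : pvSkipLine l <;> simp [hS, List.any_cons]

-- takeLine cs = the first line of cs including its terminator; afterLine cs = the rest of cs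
-- (proof-side views of splitlinesKeep).
def takeLine : List Char → List Char
  | [] => []
  | c :: r =>
    if c = '\n' then ['\n']
    else if c = '\r' then (if r.head? = some '\n' then ['\r', '\n'] else ['\r'])
    else c :: takeLine r

def afterLine : List Char → List Char
  | [] => []
  | c :: r =>
    if c = '\n' then r
    else if c = '\r' then (if r.head? = some '\n' then r.tail else r)
    else afterLine r

-- unfolding equations of splitlinesKeep (its patterns overlap, so the generic ones carry guards)
lemma slk_nil (acc : List Char) : splitlinesKeep [] acc = if acc = [] then [] else [acc.reverse] := rfl
lemma slk_nl (rest acc : List Char) :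
    splitlinesKeep ('\n' :: rest) acc = (acc.reverse ++ ['\n']) :: splitlinesKeep rest [] := rfl
lemma slk_crnl (rest acc : List Char) :
    splitlinesKeep ('\r' :: '\n' :: rest) acc = (acc.reverse ++ ['\r', '\n']) :: splitlinesKeep rest [] := rfl
lemma slk_cr1 (acc : List Char) : splitlinesKeep ['\r'] acc = [acc.reverse ++ ['\r']] := by
  simp [splitlinesKeep]
lemma slk_cr (c2 : Char) (r2 acc : List Char) (h : c2 ≠ '\n') :
    splitlinesKeep ('\r' :: c2 :: r2) acc = (acc.reverse ++ ['\r']) :: splitlinesKeep (c2 :: r2) [] := by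
  rw [splitlinesKeep.eq_def]; simp [h]
lemma slk_gen (c : Char) (rest acc : List Char) (h1 : c ≠ '\n') (h2 : c ≠ '\r') :
    splitlinesKeep (c :: rest) acc = splitlinesKeep rest (c :: acc) := by
  rw [splitlinesKeep.eq_def]; simp [h1, h2]

-- the accumulator only prefixes the first produced line
lemma splitAcc : ∀ (n : Nat) (cs acc : List Char), cs.length ≤ n →
    splitlinesKeep cs acc = (match splitlinesKeep cs [] with
      | [] => if acc = [] then [] else [acc.reverse]
      | l :: ls => (acc.reverse ++ l) :: ls) := by
  intro n
  induction n with
  | zero =>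
    intro cs acc hlen
    rw [List.length_eq_zero_iff.mp (Nat.le_zero.mp hlen), slk_nil, slk_nil]
    by_cases h : acc = [] <;> simp [h]
  | succ n ihn =>
    intro cs acc hlen
    cases cs with
    | nil =>
      rw [slk_nil, slk_nil]
      by_cases h : acc = [] <;> simp [h]
    | cons c rest =>
      simp only [List.length_cons, Nat.succ_le_succ_iff] at hlen
      by_cases h1 : c = '\n'
      · subst h1; rw [slk_nl, slk_nl]; simp
      · by_cases h2 : c = '\r'
        · subst h2
          cases rest with
          | nil => rw [slk_cr1, slk_cr1]; simp
          | cons c2 r2 =>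
            by_cases hc2 : c2 = '\n'
            · subst hc2; rw [slk_crnl, slk_crnl]; simp
            · rw [slk_cr c2 r2 acc hc2, slk_cr c2 r2 [] hc2]; simp
        · rw [slk_gen c rest acc h1 h2, slk_gen c rest [] h1 h2,
              ihn rest (c :: acc) hlen, ihn rest [c] hlen]
          cases splitlinesKeep rest [] <;> simp

lemma splitlinesKeep_cons : ∀ (cs : List Char), cs ≠ [] →
    splitlinesKeep cs [] = takeLine cs :: splitlinesKeep (afterLine cs) [] := by
  have main : ∀ (n : Nat) (cs : List Char), cs.length ≤ n → cs ≠ [] →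
      splitlinesKeep cs [] = takeLine cs :: splitlinesKeep (afterLine cs) [] := by
    intro n
    induction n with
    | zero => intro cs hlen hne; exact absurd (List.length_eq_zero_iff.mp (Nat.le_zero.mp hlen)) hne
    | succ n ihn =>
      intro cs hlen hne
      cases cs with
      | nil => exact absurd rfl hne
      | cons c rest =>
        simp only [List.length_cons, Nat.succ_le_succ_iff] at hlen
        by_cases h1 : c = '\n'
        · subst h1
          rw [slk_nl]
          simp [takeLine, afterLine]
        · by_cases h2 : c = '\r'
          · subst h2
            cases rest with
            | nil => rw [slk_cr1]; simp [takeLine, afterLine, slk_nil]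
            | cons c2 r2 =>
              by_cases hc2 : c2 = '\n'
              · subst hc2; rw [slk_crnl]; simp [takeLine, afterLine]
              · rw [slk_cr c2 r2 [] hc2]
                simp [takeLine, afterLine, hc2]
          · rw [slk_gen c rest [] h1 h2, splitAcc rest.length rest [c] le_rfl]
            have ht : takeLine (c :: rest) = c :: takeLine rest := by simp [takeLine, h1, h2]
            have ha : afterLine (c :: rest) = afterLine rest := by simp [afterLine, h1, h2]
            rw [ht, ha]
            cases hrest : rest with
            | nil => simp [hrest, slk_nil, takeLine, afterLine]
            | cons c2 r2 =>
              rw [← hrest, ihn rest hlen (by simp [hrest])]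
              simp
  exact fun cs => main cs.length cs le_rfl

-- startswith sees through takeLine when the pattern holds no line break.
lemma startswith_takeLine (cs : List Char) :
    ∀ tok : List Char, tok ≠ [] → (∀ c ∈ tok, c ≠ '\n' ∧ c ≠ '\r') →
      PySem.Chars.startswith (takeLine cs) tok = PySem.Chars.startswith cs tok := by
  induction cs with
  | nil => intro tok _ _; rfl
  | cons c r ih =>
    intro tok htok hnl
    cases tok with
    | nil => exact absurd rfl htok
    | cons t0 ts =>
      have ht0 := hnl t0 (by simp)
      have hb1 : (t0 == '\n') = false := by simp [ht0.1]
      have hb2 : (t0 == '\r') = false := by simp [ht0.2]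
      simp only [takeLine]
      split_ifs with h1 h2 h3
      · subst h1; simp [PySem.Chars.startswith, List.isPrefixOf, hb1]
      · subst h2; simp [PySem.Chars.startswith, List.isPrefixOf, hb2]
      · subst h2; simp [PySem.Chars.startswith, List.isPrefixOf, hb2]
      · by_cases hc : t0 = c
        · subst hc
          cases ts with
          | nil => simp [PySem.Chars.startswith, List.isPrefixOf]
          | cons u us =>
            have hih := ih (u :: us) (by simp) (fun d hd => hnl d (List.mem_cons_of_mem _ hd))
            simp only [PySem.Chars.startswith, List.isPrefixOf] at hih ⊢
            simp [hih]
        · have hbc : (t0 == c) = false := by simp [hc]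
          simp [PySem.Chars.startswith, List.isPrefixOf, hbc]

-- startswith sees through rstrip when the pattern ends in a non-space character.
lemma startswith_rstrip (u tok : List Char) (d : Char) (ts : List Char)
    (hrev : tok.reverse = d :: ts) (hd : PySem.Chars.isspace d = false) :
    PySem.Chars.startswith (PySem.Chars.rstrip u) tok = PySem.Chars.startswith u tok := by
  rw [Bool.eq_iff_iff]
  constructor
  · -- rstrip u is a prefix of u
    intro h
    rw [PySem.Chars.startswith_iff] at h ⊢
    refine h.trans ?_
    unfold PySem.Chars.rstrip
    have hs : List.dropWhile PySem.Chars.isspace u.reverse <:+ u.reverse := List.dropWhile_suffix _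
    obtain ⟨w, hw⟩ := hs
    exact ⟨w.reverse, by rw [← List.reverse_append, hw, List.reverse_reverse]⟩
  · intro h
    rw [PySem.Chars.startswith_iff] at h ⊢
    obtain ⟨v, hv⟩ := h
    subst hv
    unfold PySem.Chars.rstrip
    rw [List.reverse_append, List.dropWhile_append]
    split_ifs with hdw
    · rw [hrev, List.dropWhile_cons_of_neg (by simp [hd])]
      exact ⟨[], by simp [← hrev]⟩
    · exact ⟨(List.dropWhile PySem.Chars.isspace v.reverse).reverse,
        by rw [List.reverse_append, List.reverse_reverse]⟩

-- strip drops a leading whitespace character.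
lemma strip_cons_space (c : Char) (l : List Char) (hc : PySem.Chars.isspace c = true) :
    PySem.Chars.strip (c :: l) = PySem.Chars.strip l := by
  unfold PySem.Chars.strip PySem.Chars.lstrip
  rw [List.dropWhile_cons_of_pos hc]

-- On a line headed by a non-space character, "strip-then-startswith" over the first line of cs
-- is just startswith on cs itself, for both tokens.
lemma pvInjLine_takeLine (c : Char) (r : List Char) (hc : PySem.Chars.isspace c = false)
    (hn : c ≠ '\n') (hr : c ≠ '\r') :
    pvInjLine (takeLine (c :: r)) = PySem.Chars.startswith (c :: r) "%cell".toList := by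
  unfold pvInjLine
  rw [tokInj_eq]
  have ht : takeLine (c :: r) = c :: takeLine r := by simp [takeLine, hn, hr]
  rw [ht]
  unfold PySem.Chars.strip PySem.Chars.lstrip
  rw [List.dropWhile_cons_of_neg (by simp [hc])]
  rw [startswith_rstrip (c :: takeLine r) _ 'l' ['l', 'e', 'c', '%'] (by simp)
        (by simp [PySem.Chars.isspace])]
  rw [← ht, startswith_takeLine (c :: r) _ (by simp) (by intro d hd; fin_cases hd <;> simp)]

lemma pvSkipLine_takeLine (c : Char) (r : List Char) (hc : PySem.Chars.isspace c = false)
    (hn : c ≠ '\n') (hr : c ≠ '\r') :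
    pvSkipLine (takeLine (c :: r)) = PySem.Chars.startswith (c :: r) "# no %cell".toList := by
  unfold pvSkipLine
  rw [tokSkip_eq]
  have ht : takeLine (c :: r) = c :: takeLine r := by simp [takeLine, hn, hr]
  rw [ht]
  unfold PySem.Chars.strip PySem.Chars.lstrip
  rw [List.dropWhile_cons_of_neg (by simp [hc])]
  rw [startswith_rstrip (c :: takeLine r) _ 'l' ['l', 'e', 'c', '%', ' ', 'o', 'n', ' ', '#'] (by simp)
        (by simp [PySem.Chars.isspace])]
  rw [← ht, startswith_takeLine (c :: r) _ (by simp) (by intro d hd; fin_cases hd <;> simp)]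

-- a Dom character that is not one of ' ', '\t', '\n', '\r' is not Python whitespace
lemma dom_not_ws (c : Char) (hdom : pvDomChar c = true)
    (h1 : c ≠ '\n') (h2 : c ≠ '\r') (h3 : c ≠ ' ') (h4 : c ≠ '\t') :
    PySem.Chars.isspace c = false := by
  unfold pvDomChar at hdom
  unfold PySem.Chars.isspace
  have e1 : c.toNat ≠ 10 := fun h => h1 (Char.ext (by simpa using congrArg (Nat.toUInt32) h))
  have e2 : c.toNat ≠ 13 := fun h => h2 (Char.ext (by simpa using congrArg (Nat.toUInt32) h))
  have e3 : c.toNat ≠ 32 := fun h => h3 (Char.ext (by simpa using congrArg (Nat.toUInt32) h))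
  have e4 : c.toNat ≠ 9 := fun h => h4 (Char.ext (by simpa using congrArg (Nat.toUInt32) h))
  simp only [Bool.or_eq_true, Bool.and_eq_true, decide_eq_true_eq, beq_iff_eq] at hdom
  simp only [Bool.or_eq_false_iff, Bool.and_eq_false_iff, decide_eq_false_iff_not]
  omega

-- the skip token cannot match where the inject token matches (different first characters)
lemma inj_not_skip (c : Char) (r : List Char)
    (h : PySem.Chars.startswith (c :: r) "%cell".toList = true) :
    PySem.Chars.startswith (c :: r) "# no %cell".toList = false := by
  have hc : c = '%' := by
    rw [PySem.Chars.startswith_iff] at h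
    obtain ⟨t, ht⟩ := h
    simpa using congrArg List.head? ht.symm
  subst hc
  simp [PySem.Chars.startswith, List.isPrefixOf]

-- empty-ish first lines carry no directive
lemma pv_newline_lines : pvInjLine ['\n'] = false ∧ pvSkipLine ['\n'] = false ∧
    pvInjLine ['\r'] = false ∧ pvSkipLine ['\r'] = false ∧
    pvInjLine ['\r', '\n'] = false ∧ pvSkipLine ['\r', '\n'] = false := by decide

-- lines of the source after a '\r' terminator: the optional following '\n' line is blank
lemma any_lines_cr (r : List Char) (p : List Char → Bool)
    (hnl : p ['\n'] = false) :
    (splitlinesKeep r []).any p = (splitlinesKeep (afterLine ('\r' :: r)) []).any p := by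
  have ha : afterLine ('\r' :: r) = if r.head? = some '\n' then r.tail else r := by
    simp [afterLine]
  rw [ha]
  by_cases h : r.head? = some '\n'
  · rw [if_pos h]
    cases r with
    | nil => simp at h
    | cons c2 r2 =>
      simp only [List.head?_cons, Option.some.injEq] at h
      subst h
      rw [splitlinesKeep_cons ('\n' :: r2) (by simp)]
      have ht : takeLine ('\n' :: r2) = ['\n'] := by simp [takeLine]
      have ha2 : afterLine ('\n' :: r2) = r2 := by simp [afterLine]
      simp [ht, ha2, List.any_cons, hnl]
  · rw [if_neg h]

-- THE BRIDGE: B's character automaton computes exactly the two per-line any-scans.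
lemma scanB_spec (cs : List Char) : cs.all pvDomChar = true → ∀ (i s : Bool),
    scanB cs i s true = (i || (splitlinesKeep cs []).any pvInjLine,
                         s || (splitlinesKeep cs []).any pvSkipLine)
  ∧ scanB cs i s false = (i || (splitlinesKeep (afterLine cs) []).any pvInjLine,
                          s || (splitlinesKeep (afterLine cs) []).any pvSkipLine) := by
  induction cs with
  | nil => intro _ i s; simp [scanB, splitlinesKeep, afterLine]
  | cons c rest ih =>
    intro hdom i s
    rw [List.all_cons, Bool.and_eq_true] at hdom
    obtain ⟨hdc, hdr⟩ := hdom
    have hlines : splitlinesKeep (c :: rest) [] = takeLine (c :: rest) :: splitlinesKeep (afterLine (c :: rest)) [] :=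
      splitlinesKeep_cons _ (by simp)
    by_cases h1 : c = '\n'
    · subst h1
      constructor
      · rw [show scanB ('\n' :: rest) i s true = scanB rest i s true from by simp [scanB],
            (ih hdr i s).1, hlines]
        simp [takeLine, afterLine, List.any_cons, pv_newline_lines.1, pv_newline_lines.2.1]
      · rw [show scanB ('\n' :: rest) i s false = scanB rest i s true from by simp [scanB],
            (ih hdr i s).1]
        simp [afterLine]
    · by_cases h2 : c = '\r'
      · subst h2
        have hInj := any_lines_cr rest pvInjLine pv_newline_lines.1
        have hSkip := any_lines_cr rest pvSkipLine pv_newline_lines.2.1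
        constructor
        · rw [show scanB ('\r' :: rest) i s true = scanB rest i s true from by simp [scanB],
              (ih hdr i s).1, hlines, hInj, hSkip]
          have htl : pvInjLine (takeLine ('\r' :: rest)) = false ∧
                     pvSkipLine (takeLine ('\r' :: rest)) = false := by
            have ht : takeLine ('\r' :: rest)
                = if rest.head? = some '\n' then ['\r', '\n'] else ['\r'] := by
              simp [takeLine]
            rw [ht]
            by_cases hh : rest.head? = some '\n'
            · rw [if_pos hh]; exact ⟨pv_newline_lines.2.2.2.2.1, pv_newline_lines.2.2.2.2.2⟩
            · rw [if_neg hh]; exact ⟨pv_newline_lines.2.2.1, pv_newline_lines.2.2.2.1⟩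
          simp [List.any_cons, htl.1, htl.2]
        · rw [show scanB ('\r' :: rest) i s false = scanB rest i s true from by simp [scanB],
              (ih hdr i s).1, hInj, hSkip]
      · have hafter : afterLine (c :: rest) = afterLine rest := by simp [afterLine, h1, h2]
        have hfalse : scanB (c :: rest) i s false = scanB rest i s false := by
          simp [scanB, h1, h2]
        by_cases h3 : c = ' ' ∨ c = '\t'
        · -- leading whitespace of a line
          have hws : PySem.Chars.isspace c = true := by rcases h3 with h | h <;> subst h <;> decide
          constructor
          · rw [show scanB (c :: rest) i s true = scanB rest i s true from by
                  simp [scanB, h1, h2, h3],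
              (ih hdr i s).1, hlines, hafter]
            have ht : takeLine (c :: rest) = c :: takeLine rest := by simp [takeLine, h1, h2]
            have hI : pvInjLine (takeLine (c :: rest)) = pvInjLine (takeLine rest) := by
              rw [ht]; unfold pvInjLine; rw [strip_cons_space c _ hws]
            have hS : pvSkipLine (takeLine (c :: rest)) = pvSkipLine (takeLine rest) := by
              rw [ht]; unfold pvSkipLine; rw [strip_cons_space c _ hws]
            cases rest with
            | nil =>
              rcases h3 with h | h <;> subst h <;>
                simp [splitlinesKeep, takeLine, afterLine, List.any_cons, pvInjLine, pvSkipLine,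
                      PySem.Chars.strip, PySem.Chars.lstrip, PySem.Chars.rstrip, PySem.Chars.isspace,
                      PySem.Chars.startswith, List.isPrefixOf]
            | cons c2 r2 =>
              rw [splitlinesKeep_cons (c2 :: r2) (by simp)]
              simp [List.any_cons, hI, hS, Bool.or_assoc]
          · rw [hfalse, (ih hdr i s).2, hafter]
        · -- first non-blank character of the line: match the tokens here
          rw [not_or] at h3
          have hnws : PySem.Chars.isspace c = false := dom_not_ws c hdc h1 h2 h3.1 h3.2
          have hI : pvInjLine (takeLine (c :: rest)) = PySem.Chars.startswith (c :: rest) "%cell".toList :=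
            pvInjLine_takeLine c rest hnws h1 h2
          have hS : pvSkipLine (takeLine (c :: rest)) = PySem.Chars.startswith (c :: rest) "# no %cell".toList :=
            pvSkipLine_takeLine c rest hnws h1 h2
          constructor
          · have hunf : scanB (c :: rest) i s true =
                (if PySem.Chars.startswith (c :: rest) "%cell".toList then scanB rest true s false
                 else if PySem.Chars.startswith (c :: rest) "# no %cell".toList then scanB rest i true false
                 else scanB rest i s false) := by
              simp only [scanB]
              rw [if_neg (by simp [h1, h2]), if_pos trivial, if_neg (by simp [h3.1, h3.2])]
            rw [hunf, hlines, hafter]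
            by_cases t1 : PySem.Chars.startswith (c :: rest) "%cell".toList = true
            · rw [if_pos t1, (ih hdr true s).2]
              have t2 := inj_not_skip c rest t1
              simp only [List.any_cons, hI, hS, t1, t2]
              simp
            · rw [if_neg t1, Bool.not_eq_true] at *
              by_cases t2 : PySem.Chars.startswith (c :: rest) "# no %cell".toList = true
              · rw [if_pos t2, (ih hdr i true).2]
                simp only [List.any_cons, hI, hS, t1, t2]
                simp
              · rw [if_neg t2, (ih hdr i s).2]
                rw [Bool.not_eq_true] at t2
                simp only [List.any_cons, hI, hS, t1, t2]
                simp
          · rw [hfalse, (ih hdr i s).2, hafter]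

-- ===== VERDICT (by name: the statement is the Claim_ definition above) =====
theorem cell_injected_into_test_spec : Claim_equal_cell_injected_into_test := by
  unfold Claim_equal_cell_injected_into_test
  intro s hdom hpre
  unfold Spec_cell_injected_into_test cell_injected_into_test cell_injected_into_test_alt source2lines
  have hd : s.toList.all pvDomChar = true := hdom
  rw [loopA, (scanB_spec s.toList hd false false).1]
  unfold Pre_cell_injected_into_test at hpre
  cases hI : (splitlinesKeep s.toList []).any pvInjLine <;>
    cases hS : (splitlinesKeep s.toList []).any pvSkipLine
  · simp [hI, hS]
  · simp [hI, hS]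
  · simp [hI, hS]
  · exact absurd ⟨hI, hS⟩ hpre
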